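-- pv_equiv track=rewrite | github.com/me-oniichan/AKUMA | K21MR Sem 3/INT213 PYTHON_PROGRAMMING/K21-(26sept)1st Oct/Bus Station.py | solve
-- ===== SOURCE A (Python) =====
-- def solve(a):
--     res = list()
--     sum_a = list()
--     n = 0
--     for i in a:
--         n += i
--         sum_a.append(n)
--     sum_a = set(sum_a)
--     res.append(n)
--     for i in range(2, n//max(a)+1):
--         if n % i == 0:
--             m = n // i
--             sum_m = list()
--             for j in range(1, i+1):
--                 sum_m.append(j*m)
--             sum_m = set(sum_m)
--             if sum_m.issubset(sum_a):
--                 res.append(m)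
--     return sorted(res)
-- ===== SOURCE B (Python) =====
-- def solve(a):
--     sums = set()
--     total = 0
--     for x in a:
--         total += x
--         sums.add(total)
--     k = total // max(a)
--     res = [total]
--     for m in sums:
--         if m != 0 and total % m == 0:
--             i = total // m
--             if 2 <= i <= k and all(j * m in sums for j in range(1, i + 1)):
--                 res.append(m)
--     return sorted(res)
-- ===== Notes on version B (the rewrite author's own statement) =====
-- stated objective: alternative
-- what changed: B draws its divisor candidates from the distinct prefix sums themselves (every valid block size m is a prefix sum with n % m == 0), checking the multiples with an early-exit all(), instead of A's scan over every i in range(2, n//max(a)+1) that builds a fresh list and set of multiples for each divisor.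
import Mathlib
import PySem

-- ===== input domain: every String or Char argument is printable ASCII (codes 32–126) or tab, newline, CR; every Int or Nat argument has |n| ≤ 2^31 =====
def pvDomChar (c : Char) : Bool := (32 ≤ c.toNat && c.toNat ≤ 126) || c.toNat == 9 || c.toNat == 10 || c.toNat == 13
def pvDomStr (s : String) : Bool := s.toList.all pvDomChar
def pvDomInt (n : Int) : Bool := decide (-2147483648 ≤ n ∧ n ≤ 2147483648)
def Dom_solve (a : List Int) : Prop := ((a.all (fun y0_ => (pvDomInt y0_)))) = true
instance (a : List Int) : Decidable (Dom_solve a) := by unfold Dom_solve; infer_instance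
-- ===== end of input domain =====

-- B takes its divisor candidates from the distinct prefix sums (each valid block size m is itself a
-- prefix sum) instead of scanning all i in range(2, n//max(a)+1); same return value, alternative algorithm.

-- ===== PORT A =====
def solve (a : List Int) : List Int :=
  match PySem.List.max? a (fun x => x) with
  | none => []   -- Python: max(a) raises ValueError on []; excluded by Pre_solve
  | some mx =>
    let st := a.foldl (fun (p : Int × List Int) i => (p.1 + i, p.2 ++ [p.1 + i])) (0, [])
    let n := st.1
    let sumA : PySem.Set Int := PySem.Set.ofList st.2
    let res : List Int := [n]
    -- max(a) = 0 makes Python raise ZeroDivisionError; excluded by Pre_solve (floordiv is total in Lean)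
    let res := (PySem.List.pyRange 2 (PySem.Int.floordiv n mx + 1) 1).foldl (fun res i =>
      if PySem.Int.mod n i = 0 then
        let m := PySem.Int.floordiv n i
        let sumM := (PySem.List.pyRange 1 (i + 1) 1).foldl (fun l j => l ++ [j * m]) ([] : List Int)
        if PySem.Set.issubset (PySem.Set.ofList sumM) sumA then res ++ [m] else res
      else res) res
    PySem.List.sorted res (fun x => x) false

-- ===== PORT B =====
def solve_alt (a : List Int) : List Int :=
  let st := a.foldl (fun (p : Int × PySem.Set Int) x => (p.1 + x, PySem.Set.add p.2 (p.1 + x)))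
      (0, PySem.Set.empty)
  let total := st.1
  let sums := st.2
  match PySem.List.max? a (fun x => x) with
  | none => []   -- max(a) raises on []; excluded by Pre_solve
  | some mx =>
    let k := PySem.Int.floordiv total mx
    -- iterating the set is safe here: the appended values are then sorted, so the result
    -- does not depend on the iteration order
    let res := sums.foldl (fun res m =>
      if m ≠ 0 ∧ PySem.Int.mod total m = 0 then
        let i := PySem.Int.floordiv total m
        if 2 ≤ i ∧ i ≤ k ∧ (PySem.List.pyRange 1 (i + 1) 1).all
            (fun j => PySem.Set.contains sums (j * m)) then
          res ++ [m]
        else res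
      else res) [total]
    PySem.List.sorted res (fun x => x) false

-- ===== PRECONDITION & SPEC =====
-- Pre_ excludes exactly the inputs where Python A raises: the empty list (max() ValueError) and max(a)=0 (ZeroDivisionError); B raises on the same inputs
def Pre_solve (a : List Int) : Prop :=
  a ≠ [] ∧ PySem.List.max? a (fun x => x) ≠ some 0
instance (a : List Int) : Decidable (Pre_solve a) := by unfold Pre_solve; infer_instance
def pvWitness_solve : List Int := [1, 2, 3]

def Spec_solve (a : List Int) (out : List Int) : Prop := out = solve_alt a
instance (a : List Int) (out : List Int) : Decidable (Spec_solve a out) := by unfold Spec_solve; infer_instance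

-- ===== CLAIM (what is proved, stated in full; the proofs are below) =====
def Claim_equal_solve : Prop := ∀ (a : List Int), Dom_solve a → Pre_solve a → Spec_solve a (solve a)

-- ===== LEMMAS AND PROOFS =====

theorem fd_exact (i m : Int) (hi : i ≠ 0) : PySem.Int.floordiv (m * i) i = m := by
  have h : PySem.Int.mod (m * i) i = 0 := (PySem.Int.mod_eq_zero_iff_dvd _ _).mpr ⟨m, mul_comm m i⟩
  have h2 := PySem.Int.floordiv_mul_add_mod (m * i) i
  rw [h, add_zero] at h2
  exact mul_right_cancel₀ hi h2

theorem fd_zero (b : Int) (hb : b ≠ 0) : PySem.Int.floordiv 0 b = 0 := by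
  simpa using fd_exact b 0 hb

theorem exact_mul {n i : Int} (h : PySem.Int.mod n i = 0) :
    PySem.Int.floordiv n i * i = n := by
  have h2 := PySem.Int.floordiv_mul_add_mod n i
  rw [h, add_zero] at h2; exact h2

def PA (n : Int) (S : List Int) (i : Int) : Bool :=
  (PySem.Int.mod n i == 0) &&
  PySem.Set.issubset
    (PySem.Set.ofList ((PySem.List.pyRange 1 (i + 1) 1).map (fun j => j * PySem.Int.floordiv n i)))
    (PySem.Set.ofList S)

def CB (n K : Int) (S : List Int) (m : Int) : Bool :=
  (m != 0) && (PySem.Int.mod n m == 0) &&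
  decide (2 ≤ PySem.Int.floordiv n m) && decide (PySem.Int.floordiv n m ≤ K) &&
  (PySem.List.pyRange 1 (PySem.Int.floordiv n m + 1) 1).all
    (fun j => PySem.Set.contains (PySem.Set.ofList S) (j * m))

theorem PA_iff (n : Int) (S : List Int) (i : Int) :
    PA n S i = true ↔ PySem.Int.mod n i = 0 ∧
      PySem.Set.issubset
        (PySem.Set.ofList ((PySem.List.pyRange 1 (i + 1) 1).map (fun j => j * PySem.Int.floordiv n i)))
        (PySem.Set.ofList S) = true := by
  simp [PA]

theorem CB_iff (n K : Int) (S : List Int) (m : Int) :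
    CB n K S m = true ↔ m ≠ 0 ∧ PySem.Int.mod n m = 0 ∧
      2 ≤ PySem.Int.floordiv n m ∧ PySem.Int.floordiv n m ≤ K ∧
      ((PySem.List.pyRange 1 (PySem.Int.floordiv n m + 1) 1).all
        (fun j => PySem.Set.contains (PySem.Set.ofList S) (j * m)) = true) := by
  simp [CB]; tauto

theorem nzero (n K : Int) (h0 : n = 0 → K ≤ 1) {i : Int} (h2 : 2 ≤ i) (hK : i ≤ K) : n ≠ 0 := by
  intro h; have := h0 h; omega

theorem mem_iff (n K : Int) (S : List Int) (h0 : n = 0 → K ≤ 1) (x : Int) :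
    x ∈ ((PySem.List.pyRange 2 (K + 1) 1).filter (fun i => PA n S i)).map
        (fun i => PySem.Int.floordiv n i)
      ↔ x ∈ (PySem.Set.ofList S).filter (fun m => CB n K S m) := by
  simp only [List.mem_map, List.mem_filter, PySem.List.mem_pyRange_one, PA_iff, CB_iff]
  constructor
  · rintro ⟨i, ⟨⟨h2, hlt⟩, hmod, hsub⟩, rfl⟩
    have hK : i ≤ K := by omega
    have hn : n ≠ 0 := nzero n K h0 h2 hK
    have hi0 : i ≠ 0 := by omega
    set m := PySem.Int.floordiv n i with hm
    have hmi : m * i = n := exact_mul hmod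
    have hm0 : m ≠ 0 := by intro h; rw [h, zero_mul] at hmi; exact hn hmi.symm
    have hsub' := (PySem.Set.issubset_iff _ _).mp hsub
    have hmemS : ∀ j : Int, 1 ≤ j → j ≤ i → j * m ∈ S := by
      intro j hj1 hj2
      have : j * m ∈ PySem.Set.ofList S := by
        apply hsub'
        rw [PySem.Set.mem_ofList]
        exact List.mem_map.mpr ⟨j, PySem.List.mem_pyRange_one.mpr ⟨hj1, by omega⟩, rfl⟩
      rwa [PySem.Set.mem_ofList] at this
    have hfd : PySem.Int.floordiv n m = i := by
      rw [← hmi, mul_comm]; exact fd_exact m i hm0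
    refine ⟨by rw [PySem.Set.mem_ofList]; simpa using hmemS 1 le_rfl (by omega), hm0,
      (PySem.Int.mod_eq_zero_iff_dvd _ _).mpr ⟨i, hmi.symm⟩, by rw [hfd]; omega, by rw [hfd]; omega, ?_⟩
    rw [hfd]
    rw [List.all_eq_true]
    intro j hj
    obtain ⟨hj1, hj2⟩ := PySem.List.mem_pyRange_one.mp hj
    rw [PySem.Set.contains_iff, PySem.Set.mem_ofList]
    exact hmemS j hj1 (by omega)
  · rintro ⟨hmS, hm0, hmod, h2, hK, hall⟩
    set i := PySem.Int.floordiv n x with hi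
    have hin : i * x = n := exact_mul hmod
    have hi0 : i ≠ 0 := by omega
    have hfd : PySem.Int.floordiv n i = x := by
      rw [← hin, mul_comm]; exact fd_exact i x hi0
    refine ⟨i, ⟨⟨h2, by omega⟩, (PySem.Int.mod_eq_zero_iff_dvd _ _).mpr ⟨x, hin.symm⟩, ?_⟩, hfd⟩
    rw [PySem.Set.issubset_iff]
    intro y hy
    rw [PySem.Set.mem_ofList] at hy
    obtain ⟨j, hj, rfl⟩ := List.mem_map.mp hy
    rw [List.all_eq_true] at hall
    have := hall j hj
    rw [PySem.Set.contains_iff] at this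
    rwa [hfd]

theorem nodupLA (n K : Int) (S : List Int) (h0 : n = 0 → K ≤ 1) :
    (((PySem.List.pyRange 2 (K + 1) 1).filter (fun i => PA n S i)).map
      (fun i => PySem.Int.floordiv n i)).Nodup := by
  apply List.Nodup.map_on _ ((PySem.List.nodup_pyRange_one 2 (K+1)).filter _)
  intro i hi i' hi' heq
  obtain ⟨hir, hip⟩ := List.mem_filter.mp hi
  obtain ⟨hir', hip'⟩ := List.mem_filter.mp hi'
  obtain ⟨h2, hlt⟩ := PySem.List.mem_pyRange_one.mp hir
  obtain ⟨h2', hlt'⟩ := PySem.List.mem_pyRange_one.mp hir'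
  have hn : n ≠ 0 := nzero n K h0 h2 (by omega)
  have hmod := ((PA_iff n S i).mp hip).1
  have hmod' := ((PA_iff n S i').mp hip').1
  have e1 : PySem.Int.floordiv n i * i = n := exact_mul hmod
  have e2 : PySem.Int.floordiv n i' * i' = n := exact_mul hmod'
  have hm0 : PySem.Int.floordiv n i ≠ 0 := by
    intro h; rw [h, zero_mul] at e1; exact hn e1.symm
  rw [heq] at e1 hm0
  exact mul_left_cancel₀ hm0 (e1.trans e2.symm)

theorem core (n K : Int) (S : List Int) (h0 : n = 0 → K ≤ 1) :
    PySem.List.sorted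
      ((PySem.List.pyRange 2 (K + 1) 1).foldl (fun res i =>
        if PySem.Int.mod n i = 0 then
          if PySem.Set.issubset
              (PySem.Set.ofList ((PySem.List.pyRange 1 (i + 1) 1).foldl
                (fun l j => l ++ [j * PySem.Int.floordiv n i]) ([] : List Int)))
              (PySem.Set.ofList S) then res ++ [PySem.Int.floordiv n i] else res
        else res) [n]) (fun x => x) false
    = PySem.List.sorted
      ((PySem.Set.ofList S).foldl (fun res m =>
        if m ≠ 0 ∧ PySem.Int.mod n m = 0 then
          if 2 ≤ PySem.Int.floordiv n m ∧ PySem.Int.floordiv n m ≤ K ∧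
              (PySem.List.pyRange 1 (PySem.Int.floordiv n m + 1) 1).all
                (fun j => PySem.Set.contains (PySem.Set.ofList S) (j * m)) then
            res ++ [m]
          else res
        else res) [n]) (fun x => x) false := by
  have hA : ∀ (res : List Int) (i : Int),
      (if PySem.Int.mod n i = 0 then
        if PySem.Set.issubset
            (PySem.Set.ofList ((PySem.List.pyRange 1 (i + 1) 1).foldl
              (fun l j => l ++ [j * PySem.Int.floordiv n i]) ([] : List Int)))
            (PySem.Set.ofList S) then res ++ [PySem.Int.floordiv n i] else res
      else res)
      = if PA n S i then res ++ [PySem.Int.floordiv n i] else res := by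
    intro res i
    rw [PySem.List.foldl_append_singleton_eq_map, List.nil_append]
    by_cases h1 : PySem.Int.mod n i = 0 <;>
      by_cases h2 : PySem.Set.issubset
        (PySem.Set.ofList ((PySem.List.pyRange 1 (i + 1) 1).map
          (fun j => j * PySem.Int.floordiv n i))) (PySem.Set.ofList S) = true <;>
      simp [PA, h1, h2]
  have hB : ∀ (res : List Int) (m : Int),
      (if m ≠ 0 ∧ PySem.Int.mod n m = 0 then
        if 2 ≤ PySem.Int.floordiv n m ∧ PySem.Int.floordiv n m ≤ K ∧
            (PySem.List.pyRange 1 (PySem.Int.floordiv n m + 1) 1).all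
              (fun j => PySem.Set.contains (PySem.Set.ofList S) (j * m)) then
          res ++ [m]
        else res
      else res)
      = if CB n K S m then res ++ [m] else res := by
    intro res m
    rcases h : CB n K S m with _ | _
    · have := h; rw [← Bool.not_eq_true, CB_iff] at this
      simp only [Bool.false_eq_true, if_false]
      split_ifs with h1 h2 <;> first
        | rfl
        | exact absurd ⟨h1.1, h1.2, h2.1, h2.2.1, h2.2.2⟩ this
    · obtain ⟨hm0, hmod, hh2, hhK, hall⟩ := (CB_iff n K S m).mp h
      rw [if_pos ⟨hm0, hmod⟩, if_pos ⟨hh2, hhK, hall⟩, if_pos rfl]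
  rw [funext fun res => funext (hA res), funext fun res => funext (hB res)]
  rw [PySem.List.foldl_append_if, PySem.List.foldl_append_if_eq_filter]
  apply PySem.List.sorted_eq_sorted_of_perm _ _ _ (fun x y h => h)
  apply List.Perm.cons
  exact (List.perm_ext_iff_of_nodup (nodupLA n K S h0)
    ((PySem.Set.nodup_ofList S).filter _)).mpr (mem_iff n K S h0)

def psums (c : Int) : List Int → List Int
  | [] => []
  | x :: xs => (c + x) :: psums (c + x) xs

theorem foldlA_eq (a : List Int) (c : Int) (l : List Int) :
    a.foldl (fun (p : Int × List Int) i => (p.1 + i, p.2 ++ [p.1 + i])) (c, l)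
      = (c + a.sum, l ++ psums c a) := by
  induction a generalizing c l with
  | nil => simp [psums]
  | cons x xs ih => simp [psums, ih, List.append_assoc]; ring_nf

theorem foldlB_eq (a : List Int) (c : Int) (s : PySem.Set Int) :
    a.foldl (fun (p : Int × PySem.Set Int) x => (p.1 + x, PySem.Set.add p.2 (p.1 + x))) (c, s)
      = (c + a.sum, (psums c a).foldl PySem.Set.add s) := by
  induction a generalizing c s with
  | nil => simp [psums]
  | cons x xs ih => simp [psums, ih]; ring_nf

theorem main_eq (a : List Int) (mx : Int)
    (hmx : PySem.List.max? a (fun x => x) = some mx) (hmx0 : mx ≠ 0) :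
    solve a = solve_alt a := by
  unfold solve solve_alt
  rw [hmx, foldlA_eq, foldlB_eq]
  simp only [zero_add, List.nil_append]
  rw [show (PySem.Set.empty : PySem.Set Int) = ([] : List Int) from rfl]
  rw [← PySem.Set.ofList_eq_foldl]
  exact core a.sum (PySem.Int.floordiv a.sum mx) (psums 0 a)
    (fun h => by rw [h, fd_zero mx hmx0]; norm_num)

-- ===== VERDICT (by name: the statement is the Claim_ definition above) =====
theorem solve_spec : Claim_equal_solve := by
  intro a _ hpre
  obtain ⟨ha, hm0⟩ := hpre
  unfold Spec_solve
  rcases h : PySem.List.max? a (fun x => x) with _ | mx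
  · exact absurd ((PySem.List.max?_eq_none_iff a (fun x => x)).mp h) ha
  · exact main_eq a mx h (fun h0 => hm0 (h ▸ by rw [h0]))
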